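-- pv_equiv track=rewrite | github.com/ZIJIAN004/UniCOP | Latent-SFT/entropy_profile.py | detect_latent_segments
-- ===== SOURCE A (Python) =====
-- def detect_latent_segments(entropies, window, min_segment):
--     """
--     基于熵趋势检测 latent 段。
--
--     连续 window 步上升 → 进入 latent（entry = 上升起点）
--     连续 window 步下降 → 退出 latent（exit = 下降终点）
--     """
--     n = len(entropies)
--     segments = []
--     in_latent = False
--     entry = None
--
--     for i in range(window, n):
--         if not in_latent:
--             rising = all(
--                 entropies[i - window + j] < entropies[i - window + j + 1]
--                 for j in range(window)
--             )
--             if rising: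
--                 entry = i - window
--                 in_latent = True
--         else:
--             falling = all(
--                 entropies[i - window + j] > entropies[i - window + j + 1]
--                 for j in range(window)
--             )
--             if falling:
--                 if i - entry >= min_segment:
--                     segments.append({"start": entry, "end": i})
--                 in_latent = False
--                 entry = None
--
--     if in_latent and entry is not None:
--         if n - 1 - entry >= min_segment:
--             segments.append({"start": entry, "end": n - 1})
--
--     return segments
-- ===== SOURCE B (Python) =====
-- def detect_latent_segments(entropies, window, min_segment):
--     # One pass with running rise/fall run-length counters: O(n) instead of O(n*window).
--     n = len(entropies)
--     segments = []
--     in_latent = False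
--     entry = 0
--     up = 0
--     down = 0
--     for i in range(1, n):
--         up = up + 1 if entropies[i - 1] < entropies[i] else 0
--         down = down + 1 if entropies[i - 1] > entropies[i] else 0
--         if i < window:
--             continue
--         if not in_latent:
--             if up >= window:
--                 in_latent = True
--                 entry = i - window
--         elif down >= window:
--             if i - entry >= min_segment:
--                 segments.append({"start": entry, "end": i})
--             in_latent = False
--     if in_latent and n - 1 - entry >= min_segment:
--         segments.append({"start": entry, "end": n - 1})
--     return segments
-- ===== Notes on version B (the rewrite author's own statement) =====
-- stated objective: faster
-- what changed: Replaces the per-step all() rescan of the last `window` adjacent pairs by running rise/fall run-length counters maintained in one pass, so each window check is O(1).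
-- outside the precondition, e.g. on detect_latent_segments([0, 1, 2], 0, 1): A returns [{'start': 0, 'end': 1}], B returns [{'start': 1, 'end': 2}]
import Mathlib
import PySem

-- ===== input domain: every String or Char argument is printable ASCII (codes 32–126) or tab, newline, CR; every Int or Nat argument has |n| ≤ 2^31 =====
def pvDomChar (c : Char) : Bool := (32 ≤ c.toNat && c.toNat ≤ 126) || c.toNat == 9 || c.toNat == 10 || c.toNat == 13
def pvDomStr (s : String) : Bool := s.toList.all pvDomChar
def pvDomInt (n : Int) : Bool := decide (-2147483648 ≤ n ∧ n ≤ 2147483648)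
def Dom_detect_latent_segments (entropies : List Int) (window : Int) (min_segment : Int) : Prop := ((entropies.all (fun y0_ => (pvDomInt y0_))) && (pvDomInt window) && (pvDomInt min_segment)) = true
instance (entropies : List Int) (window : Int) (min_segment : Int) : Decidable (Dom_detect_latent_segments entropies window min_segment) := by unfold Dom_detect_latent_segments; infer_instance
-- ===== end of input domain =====

-- B replaces A's per-step all() rescan of the last `window` pairs by running rise/fall
-- run-length counters (one pass, O(1) per step): objective = faster (asymptotic).

-- ===== PORT A =====
def aStep (entropies : List Int) (window min_segment : Int)
    (st : List (List (String × Int)) × Bool × Option Int) (i : Int) :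
    List (List (String × Int)) × Bool × Option Int :=
  match st with
  | (segments, in_latent, entry) =>
    if in_latent = false then
      let rising := (PySem.List.pyRange 0 window 1).all (fun j =>
        decide (PySem.List.pyGetD entropies (i - window + j) 0 <
                PySem.List.pyGetD entropies (i - window + j + 1) 0))
      if rising then (segments, true, some (i - window)) else (segments, in_latent, entry)
    else
      let falling := (PySem.List.pyRange 0 window 1).all (fun j =>
        decide (PySem.List.pyGetD entropies (i - window + j) 0 >
                PySem.List.pyGetD entropies (i - window + j + 1) 0))
      if falling then
        ((if i - entry.getD 0 ≥ min_segment then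
            segments ++ [[("start", entry.getD 0), ("end", i)]] else segments), false, none)
      else (segments, in_latent, entry)

def aFin (n min_segment : Int) (st : List (List (String × Int)) × Bool × Option Int) :
    List (List (String × Int)) :=
  match st with
  | (segments, in_latent, entry) =>
    if in_latent && entry.isSome then
      if n - 1 - entry.getD 0 ≥ min_segment then
        segments ++ [[("start", entry.getD 0), ("end", n - 1)]]
      else segments
    else segments

def detect_latent_segments (entropies : List Int) (window : Int) (min_segment : Int) :
    List (List (String × Int)) :=
  aFin (entropies.length : Int) min_segment
    ((PySem.List.pyRange window (entropies.length : Int) 1).foldl (aStep entropies window min_segment) ([], false, none))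

-- ===== PORT B =====
def bStep (entropies : List Int) (window min_segment : Int)
    (st : List (List (String × Int)) × Bool × Int × Int × Int) (i : Int) :
    List (List (String × Int)) × Bool × Int × Int × Int :=
  match st with
  | (segments, in_latent, entry, up, down) =>
    let up := if PySem.List.pyGetD entropies (i - 1) 0 < PySem.List.pyGetD entropies i 0 then up + 1 else 0
    let down := if PySem.List.pyGetD entropies (i - 1) 0 > PySem.List.pyGetD entropies i 0 then down + 1 else 0
    if i < window then (segments, in_latent, entry, up, down)
    else if in_latent = false then
      if up ≥ window then (segments, true, i - window, up, down)
      else (segments, in_latent, entry, up, down)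
    else if down ≥ window then
      ((if i - entry ≥ min_segment then segments ++ [[("start", entry), ("end", i)]] else segments),
       false, entry, up, down)
    else (segments, in_latent, entry, up, down)

def bFin (n min_segment : Int) (st : List (List (String × Int)) × Bool × Int × Int × Int) :
    List (List (String × Int)) :=
  match st with
  | (segments, in_latent, entry, _, _) =>
    if in_latent && decide (n - 1 - entry ≥ min_segment) then
      segments ++ [[("start", entry), ("end", n - 1)]]
    else segments

def detect_latent_segments_alt (entropies : List Int) (window : Int) (min_segment : Int) :
    List (List (String × Int)) :=
  bFin (entropies.length : Int) min_segment
    ((PySem.List.pyRange 1 (entropies.length : Int) 1).foldl (bStep entropies window min_segment) ([], false, 0, 0, 0))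

-- ===== PRECONDITION & SPEC =====
-- Pre_ restricts to the natural domain of a window size, window ≥ 1: for window ≤ 0 the
-- all() over range(window) is vacuously true, so every step counts as both rising and
-- falling, and no particular output is specified there.
def Pre_detect_latent_segments (entropies : List Int) (window : Int) (min_segment : Int) : Prop :=
  1 ≤ window
instance (entropies : List Int) (window : Int) (min_segment : Int) : Decidable (Pre_detect_latent_segments entropies window min_segment) := by unfold Pre_detect_latent_segments; infer_instance

def pvWitness_detect_latent_segments : List Int × Int × Int := ([0, 1, 2, 1, 0], 2, 1)

def Spec_detect_latent_segments (entropies : List Int) (window : Int) (min_segment : Int) (out : List (List (String × Int))) : Prop := out = detect_latent_segments_alt entropies window min_segment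
instance (entropies : List Int) (window : Int) (min_segment : Int) (out : List (List (String × Int))) : Decidable (Spec_detect_latent_segments entropies window min_segment out) := by unfold Spec_detect_latent_segments; infer_instance

-- ===== CLAIM (what is proved, stated in full; the proofs are below) =====
def Claim_equal_detect_latent_segments : Prop := ∀ (entropies : List Int) (window : Int) (min_segment : Int), Dom_detect_latent_segments entropies window min_segment → Pre_detect_latent_segments entropies window min_segment → Spec_detect_latent_segments entropies window min_segment (detect_latent_segments entropies window min_segment)

-- ===== LEMMAS AND PROOFS =====

-- run length of strictly rising (resp. falling) adjacent pairs ending at index k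
def ru (e : List Int) : Nat → Int
  | 0 => 0
  | k + 1 => if PySem.List.pyGetD e (k : Int) 0 < PySem.List.pyGetD e ((k : Int) + 1) 0 then ru e k + 1 else 0

def rd (e : List Int) : Nat → Int
  | 0 => 0
  | k + 1 => if PySem.List.pyGetD e (k : Int) 0 > PySem.List.pyGetD e ((k : Int) + 1) 0 then rd e k + 1 else 0

lemma ru_nonneg (e : List Int) : ∀ k, 0 ≤ ru e k
  | 0 => le_refl 0
  | k + 1 => by
      have := ru_nonneg e k
      simp only [ru]; split <;> omega

lemma rd_nonneg (e : List Int) : ∀ k, 0 ≤ rd e k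
  | 0 => le_refl 0
  | k + 1 => by
      have := rd_nonneg e k
      simp only [rd]; split <;> omega

lemma ru_ge_iff (e : List Int) : ∀ (w i : Nat), 1 ≤ w → w ≤ i →
    ((w : Int) ≤ ru e i ↔ ∀ j : Nat, j < w →
      PySem.List.pyGetD e ((i : Int) - w + j) 0 < PySem.List.pyGetD e ((i : Int) - w + j + 1) 0) := by
  intro w
  induction w with
  | zero => intro i h; omega
  | succ w ih =>
    intro i h1 h2
    obtain ⟨k, rfl⟩ : ∃ k, i = k + 1 := ⟨i - 1, by omega⟩
    have hnn := ru_nonneg e k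
    have hcond : (((w : Nat) + 1 : Nat) : Int) ≤ ru e (k + 1) ↔
        (PySem.List.pyGetD e (k : Int) 0 < PySem.List.pyGetD e ((k : Int) + 1) 0 ∧ (w : Int) ≤ ru e k) := by
      simp only [ru]; split
      · push_cast
        exact ⟨fun h => ⟨‹_›, by omega⟩, fun h => by omega⟩
      · push_cast
        exact ⟨fun h => absurd h (by omega), fun h => absurd h.1 ‹_›⟩
    rw [hcond]
    by_cases hw : w = 0
    · subst hw
      constructor
      · intro h j hj
        have : j = 0 := by omega
        subst this
        have := h.1
        convert this using 3 <;> push_cast <;> ring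
      · intro h
        refine ⟨?_, by omega⟩
        have := h 0 (by omega)
        convert this using 3 <;> push_cast <;> ring
    · rw [ih k (by omega) (by omega)]
      constructor
      · intro h j hj
        by_cases hjw : j < w
        · have := h.2 j hjw
          convert this using 3 <;> push_cast <;> ring
        · have : j = w := by omega
          subst this
          have := h.1
          convert this using 3 <;> push_cast <;> ring
      · intro h
        constructor
        · have := h w (by omega)
          convert this using 3 <;> push_cast <;> ring
        · intro j hj
          have := h j (by omega)
          convert this using 3 <;> push_cast <;> ring

lemma rd_ge_iff (e : List Int) : ∀ (w i : Nat), 1 ≤ w → w ≤ i →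
    ((w : Int) ≤ rd e i ↔ ∀ j : Nat, j < w →
      PySem.List.pyGetD e ((i : Int) - w + j) 0 > PySem.List.pyGetD e ((i : Int) - w + j + 1) 0) := by
  intro w
  induction w with
  | zero => intro i h; omega
  | succ w ih =>
    intro i h1 h2
    obtain ⟨k, rfl⟩ : ∃ k, i = k + 1 := ⟨i - 1, by omega⟩
    have hnn := rd_nonneg e k
    have hcond : (((w : Nat) + 1 : Nat) : Int) ≤ rd e (k + 1) ↔
        (PySem.List.pyGetD e (k : Int) 0 > PySem.List.pyGetD e ((k : Int) + 1) 0 ∧ (w : Int) ≤ rd e k) := by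
      simp only [rd]; split
      · push_cast
        exact ⟨fun h => ⟨‹_›, by omega⟩, fun h => by omega⟩
      · push_cast
        exact ⟨fun h => absurd h (by omega), fun h => absurd h.1 ‹_›⟩
    rw [hcond]
    by_cases hw : w = 0
    · subst hw
      constructor
      · intro h j hj
        have : j = 0 := by omega
        subst this
        have := h.1
        convert this using 3 <;> push_cast <;> ring
      · intro h
        refine ⟨?_, by omega⟩
        have := h 0 (by omega)
        convert this using 3 <;> push_cast <;> ring
    · rw [ih k (by omega) (by omega)]
      constructor
      · intro h j hj
        by_cases hjw : j < w
        · have := h.2 j hjw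
          convert this using 3 <;> push_cast <;> ring
        · have : j = w := by omega
          subst this
          have := h.1
          convert this using 3 <;> push_cast <;> ring
      · intro h
        constructor
        · have := h w (by omega)
          convert this using 3 <;> push_cast <;> ring
        · intro j hj
          have := h j (by omega)
          convert this using 3 <;> push_cast <;> ring

-- A's `rising` test at step i equals `window ≤ ru e i`
lemma allA_rising_iff (e : List Int) (w : Int) (i : Nat) (hw : 1 ≤ w) (hwi : w ≤ (i : Int)) :
    ((PySem.List.pyRange 0 w 1).all (fun j =>
      decide (PySem.List.pyGetD e ((i : Int) - w + j) 0 < PySem.List.pyGetD e ((i : Int) - w + j + 1) 0)) = true)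
    ↔ w ≤ ru e i := by
  rw [List.all_eq_true]
  have hwn : w = (w.toNat : Int) := by omega
  rw [hwn, ru_ge_iff e w.toNat i (by omega) (by omega)]
  constructor
  · intro h j hj
    have hmem : ((j : Int)) ∈ PySem.List.pyRange 0 (w.toNat : Int) 1 := by
      rw [PySem.List.mem_pyRange_one]; omega
    have := h _ hmem
    rw [decide_eq_true_iff] at this
    exact this
  · intro h x hmem
    rw [PySem.List.mem_pyRange_one] at hmem
    rw [decide_eq_true_iff]
    have := h x.toNat (by omega)
    rw [show ((x.toNat : Nat) : Int) = x by omega] at this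
    exact this

lemma allA_falling_iff (e : List Int) (w : Int) (i : Nat) (hw : 1 ≤ w) (hwi : w ≤ (i : Int)) :
    ((PySem.List.pyRange 0 w 1).all (fun j =>
      decide (PySem.List.pyGetD e ((i : Int) - w + j) 0 > PySem.List.pyGetD e ((i : Int) - w + j + 1) 0)) = true)
    ↔ w ≤ rd e i := by
  rw [List.all_eq_true]
  have hwn : w = (w.toNat : Int) := by omega
  rw [hwn, rd_ge_iff e w.toNat i (by omega) (by omega)]
  constructor
  · intro h j hj
    have hmem : ((j : Int)) ∈ PySem.List.pyRange 0 (w.toNat : Int) 1 := by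
      rw [PySem.List.mem_pyRange_one]; omega
    have := h _ hmem
    rw [decide_eq_true_iff] at this
    exact this
  · intro h x hmem
    rw [PySem.List.mem_pyRange_one] at hmem
    rw [decide_eq_true_iff]
    have := h x.toNat (by omega)
    rw [show ((x.toNat : Nat) : Int) = x by omega] at this
    exact this

-- B's counter update at step i turns (ru (i-1), rd (i-1)) into (ru i, rd i)
lemma ru_step (e : List Int) (i : Nat) (hi : 1 ≤ i) :
    (if PySem.List.pyGetD e ((i : Int) - 1) 0 < PySem.List.pyGetD e (i : Int) 0 then ru e (i - 1) + 1 else 0) = ru e i := by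
  obtain ⟨k, rfl⟩ : ∃ k, i = k + 1 := ⟨i - 1, by omega⟩
  simp only [ru, show (k + 1 - 1 : Nat) = k by omega,
    show ((k + 1 : Nat) : Int) = (k : Int) + 1 by push_cast; omega,
    show ((k : Int) + 1 - 1 : Int) = (k : Int) by ring]

lemma rd_step (e : List Int) (i : Nat) (hi : 1 ≤ i) :
    (if PySem.List.pyGetD e ((i : Int) - 1) 0 > PySem.List.pyGetD e (i : Int) 0 then rd e (i - 1) + 1 else 0) = rd e i := by
  obtain ⟨k, rfl⟩ : ∃ k, i = k + 1 := ⟨i - 1, by omega⟩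
  simp only [rd, show (k + 1 - 1 : Nat) = k by omega,
    show ((k + 1 : Nat) : Int) = (k : Int) + 1 by push_cast; omega,
    show ((k : Int) + 1 - 1 : Int) = (k : Int) by ring]

-- the prefix of B's loop (i < window) only builds the counters
lemma b_prefix (e : List Int) (w m : Int) : ∀ k : Nat, (k : Int) ≤ w →
    (PySem.List.pyRange 1 (k : Int) 1).foldl (bStep e w m) ([], false, 0, 0, 0)
      = ([], false, 0, ru e (k - 1), rd e (k - 1)) := by
  intro k
  induction k with
  | zero => intro _; rw [PySem.List.pyRange_one_eq_nil (by omega)]; simp [ru, rd]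
  | succ k ih =>
    intro hk
    by_cases h0 : k = 0
    · subst h0
      rw [show ((1 : Nat) : Int) = 1 by norm_num, PySem.List.pyRange_one_eq_nil (by omega)]
      simp [ru, rd]
    · rw [show ((k + 1 : Nat) : Int) = (k : Int) + 1 by push_cast; omega,
         PySem.List.pyRange_one_succ_right (by omega), List.foldl_append,
         ih (by omega)]
      simp only [List.foldl_cons, List.foldl_nil, bStep]
      rw [if_pos (show (k : Int) < w by omega)]
      rw [ru_step e k (by omega), rd_step e k (by omega)]
      simp [show (k + 1 - 1 : Nat) = k by omega]

-- main coupling: from step i on (window ≤ i ≤ n), finished A-fold = finished B-fold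
lemma main_coupling (e : List Int) (w m : Int) (hw : 1 ≤ w) :
    ∀ (c i : Nat), e.length - i = c → w ≤ (i : Int) → i ≤ e.length →
    ∀ (segs : List (List (String × Int))) (lat : Bool) (ent : Int),
    aFin (e.length : Int) m ((PySem.List.pyRange (i : Int) (e.length : Int) 1).foldl (aStep e w m)
        (segs, lat, if lat then some ent else none))
    = bFin (e.length : Int) m ((PySem.List.pyRange (i : Int) (e.length : Int) 1).foldl (bStep e w m)
        (segs, lat, ent, ru e (i - 1), rd e (i - 1))) := by
  intro c
  induction c with
  | zero =>
    intro i hc hwi hile segs lat ent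
    have : i = e.length := by omega
    subst this
    rw [PySem.List.pyRange_one_eq_nil (by omega)]
    simp only [List.foldl_nil, aFin, bFin]
    cases lat
    · simp
    · simp
  | succ c ih =>
    intro i hc hwi hile segs lat ent
    have hilt : i < e.length := by omega
    rw [PySem.List.pyRange_one_cons (by omega)]
    simp only [List.foldl_cons]
    have hi1 : 1 ≤ i := by omega
    -- compute one step of each side
    cases lat with
    | false =>
      simp only [aStep, bStep]
      rw [ru_step e i hi1, rd_step e i hi1]
      rw [if_neg (show ¬ ((i : Int) < w) by omega)]
      by_cases hrise : w ≤ ru e i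
      · rw [if_pos ((allA_rising_iff e w i hw hwi).mpr hrise), if_pos (by omega : ru e i ≥ w)]
        have := ih (i + 1) (by omega) (by omega) (by omega) segs true ((i : Int) - w)
        rw [show ((i + 1 : Nat) - 1 : Nat) = i by omega] at this
        rw [show ((i : Int) + 1) = ((i + 1 : Nat) : Int) by push_cast; omega]
        simpa using this
      · rw [if_neg (fun h => hrise ((allA_rising_iff e w i hw hwi).mp h)),
            if_neg (by omega : ¬ (ru e i ≥ w))]
        have := ih (i + 1) (by omega) (by omega) (by omega) segs false ent
        rw [show ((i + 1 : Nat) - 1 : Nat) = i by omega] at this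
        rw [show ((i : Int) + 1) = ((i + 1 : Nat) : Int) by push_cast; omega]
        simpa using this
    | true =>
      simp only [aStep, bStep]
      rw [if_neg (by simp : ¬ (true = false))]
      rw [ru_step e i hi1, rd_step e i hi1]
      rw [if_neg (show ¬ ((i : Int) < w) by omega)]
      rw [if_neg (by simp : ¬ (true = false))]
      by_cases hfall : w ≤ rd e i
      · rw [if_pos ((allA_falling_iff e w i hw hwi).mpr hfall), if_pos (by omega : rd e i ≥ w)]
        have := ih (i + 1) (by omega) (by omega) (by omega)
          (if (i : Int) - ent ≥ m then segs ++ [[("start", ent), ("end", (i : Int))]] else segs) false ent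
        rw [show ((i + 1 : Nat) - 1 : Nat) = i by omega] at this
        rw [show ((i : Int) + 1) = ((i + 1 : Nat) : Int) by push_cast; omega]
        simpa using this
      · rw [if_neg (fun h => hfall ((allA_falling_iff e w i hw hwi).mp h)),
            if_neg (by omega : ¬ (rd e i ≥ w))]
        have := ih (i + 1) (by omega) (by omega) (by omega) segs true ent
        rw [show ((i + 1 : Nat) - 1 : Nat) = i by omega] at this
        rw [show ((i : Int) + 1) = ((i + 1 : Nat) : Int) by push_cast; omega]
        simpa using this

-- ===== VERDICT (by name: the statement is the Claim_ definition above) =====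
theorem detect_latent_segments_spec : Claim_equal_detect_latent_segments := by
  intro e w m _hdom hpre
  have hw : 1 ≤ w := hpre
  unfold Spec_detect_latent_segments detect_latent_segments detect_latent_segments_alt
  by_cases hc : w < (e.length : Int)
  · -- split B's range at w; w = ↑w.toNat
    have hwn : w = (w.toNat : Int) := by omega
    rw [PySem.List.pyRange_one_append 1 w (e.length : Int) (by omega) (by omega), List.foldl_append]
    rw [show (PySem.List.pyRange 1 w 1) = PySem.List.pyRange 1 (w.toNat : Int) 1 by rw [← hwn]]
    rw [b_prefix e w m w.toNat (by omega)]
    have := main_coupling e w m hw (e.length - w.toNat) w.toNat rfl (by omega) (by omega) [] false 0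
    rw [← hwn] at this
    simpa using this
  · rw [PySem.List.pyRange_one_eq_nil (by omega)]
    have hlen : ((e.length : Int)) = ((e.length : Nat) : Int) := by norm_num
    rw [b_prefix e w m e.length (by omega)]
    simp [aFin, bFin]
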